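-- pv_equiv track=rewrite | github.com/vsubrakova/defense-explorer | scripts/vizualization.py | calculate_overlapping_nodes
-- ===== SOURCE A (Python) =====
-- def calculate_overlapping_nodes(clusters: list[list]) -> int:
--     """
--     Calculates the number of nodes that belong to multiple clusters.
--
--     This function identifies nodes that appear in more than one cluster and returns
--     the total count of such overlapping nodes.
--
--     Parameters:
--     -----------
--     clusters : list of lists
--
--     Returns:
--     --------
--     int
--         The count of nodes that appear in multiple clusters.
--         For the example above, it would return 2 (nodes 2 and 3 appear in two clusters).
--     """
--     nodes_clusternumber = {}
--     for cluster in clusters: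
--         for node in cluster:
--             if nodes_clusternumber.get(node):
--                 nodes_clusternumber[node] += 1
--             else:
--                 nodes_clusternumber[node] = 1
--     number_of_multiplenodes = 0
--     for node, number_of_clusters in nodes_clusternumber.items():
--         if number_of_clusters > 1:
--             number_of_multiplenodes += 1
--     return number_of_multiplenodes
-- ===== SOURCE B (Python) =====
-- def calculate_overlapping_nodes(clusters: list[list]) -> int:
--     nodes = sorted(node for cluster in clusters for node in cluster)
--     total = 0
--     prev_dup = False
--     for a, b in zip(nodes, nodes[1:]):
--         if a == b:
--             if not prev_dup:
--                 total += 1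
--             prev_dup = True
--         else:
--             prev_dup = False
--     return total
-- ===== Notes on version B (the rewrite author's own statement) =====
-- stated objective: alternative
-- what changed: Replaced the frequency dict plus second tally pass by sort-then-adjacent-scan: flatten and sort all nodes, then one pass over adjacent pairs counting run starts of runs of length >= 2.
import Mathlib
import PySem

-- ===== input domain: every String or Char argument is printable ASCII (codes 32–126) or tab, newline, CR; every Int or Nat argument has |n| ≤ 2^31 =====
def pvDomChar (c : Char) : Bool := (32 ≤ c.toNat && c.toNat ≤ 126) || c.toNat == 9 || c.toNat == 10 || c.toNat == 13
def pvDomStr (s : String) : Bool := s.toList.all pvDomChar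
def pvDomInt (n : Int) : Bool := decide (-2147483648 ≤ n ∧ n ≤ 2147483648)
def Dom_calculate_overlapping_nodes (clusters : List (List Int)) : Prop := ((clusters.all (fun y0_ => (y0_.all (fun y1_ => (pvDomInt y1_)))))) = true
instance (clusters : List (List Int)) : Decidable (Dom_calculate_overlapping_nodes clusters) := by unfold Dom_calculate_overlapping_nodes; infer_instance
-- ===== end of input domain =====

-- B replaces A's frequency dict plus second tally pass by sort-then-adjacent-scan:
-- flatten and sort all nodes, then one pass over adjacent pairs counting run starts
-- of runs of length ≥ 2 (objective: alternative algorithm, same result).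

-- ===== PORT A =====
-- A-side helper: one inner-loop step of A's counting dict ('if d.get(node):' truthiness
-- is ported as '(get? …).getD 0 ≠ 0' — None and 0 are falsy; values here are ≥ 1 ints).
def pvA (d : PySem.Dict Int Int) (node : Int) : PySem.Dict Int Int :=
  if (PySem.Dict.get? d node).getD 0 ≠ 0 then
    PySem.Dict.insert d node (PySem.Dict.getD d node 0 + 1)
  else
    PySem.Dict.insert d node 1

def calculate_overlapping_nodes (clusters : List (List Int)) : Int :=
  let nodes_clusternumber : PySem.Dict Int Int :=
    clusters.foldl (fun d cluster => cluster.foldl pvA d) PySem.Dict.empty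
  nodes_clusternumber.items.foldl (fun acc p => if p.2 > 1 then acc + 1 else acc) 0

-- ===== PORT B =====
-- B-side helper: the body of B's for-loop over zip(nodes, nodes[1:])
-- (state = (total, prev_dup)).
def pvStep (st : Int × Bool) (p : Int × Int) : Int × Bool :=
  if p.1 == p.2 then (if st.2 then st else (st.1 + 1, true)) else (st.1, false)

def calculate_overlapping_nodes_alt (clusters : List (List Int)) : Int :=
  let nodes := PySem.List.sorted clusters.flatten (fun x => x) false
  let st := (nodes.zip (PySem.List.slice nodes (some 1) none)).foldl pvStep (0, false)
  st.1

-- ===== PRECONDITION & SPEC =====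
def Spec_calculate_overlapping_nodes (clusters : List (List Int)) (out : Int) : Prop := out = calculate_overlapping_nodes_alt clusters
instance (clusters : List (List Int)) (out : Int) : Decidable (Spec_calculate_overlapping_nodes clusters out) := by unfold Spec_calculate_overlapping_nodes; infer_instance

-- ===== CLAIM (what is proved, stated in full; the proofs are below) =====
def Claim_equal_calculate_overlapping_nodes : Prop := ∀ (clusters : List (List Int)), Dom_calculate_overlapping_nodes clusters → Spec_calculate_overlapping_nodes clusters (calculate_overlapping_nodes clusters)

-- ===== LEMMAS AND PROOFS =====

-- The common specification value: the number of distinct elements occurring ≥ 2 times.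
def pvM (l : List Int) : ℕ := (l.toFinset.filter (fun k => 2 ≤ l.count k)).card

lemma pvM_perm {l l' : List Int} (h : l.Perm l') : pvM l = pvM l' := by
  unfold pvM
  rw [List.toFinset_eq_of_perm _ _ h]
  congr 1
  apply Finset.filter_congr
  intro k _
  simp [h.count_eq]

lemma pvM_nil : pvM ([] : List Int) = 0 := by simp [pvM]

lemma pvM_single {x : Int} {rest : List Int} (hx : x ∉ rest) :
    pvM (x :: rest) = pvM rest := by
  unfold pvM
  have hc : (x :: rest).count x = 1 := by
    simp [List.count_eq_zero_of_not_mem hx]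
  rw [List.toFinset_cons, Finset.filter_insert, if_neg (by omega)]
  congr 1
  apply Finset.filter_congr
  intro k hk
  have hkx : x ≠ k := by intro h; subst h; exact hx (List.mem_toFinset.1 hk)
  simp [hkx]

lemma pvM_run {x : Int} {rest : List Int} (m : ℕ) (hx : x ∉ rest) (hm : 2 ≤ m) :
    pvM (List.replicate m x ++ rest) = 1 + pvM rest := by
  unfold pvM
  have htf : (List.replicate m x ++ rest).toFinset = insert x rest.toFinset := by
    rw [List.toFinset_append, List.toFinset_replicate_of_ne_zero (by omega : m ≠ 0),
      ← Finset.insert_eq]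
  have hcx : (List.replicate m x ++ rest).count x = m := by
    simp [List.count_append, List.count_eq_zero_of_not_mem hx]
  have hfeq : Finset.filter (fun k => 2 ≤ (List.replicate m x ++ rest).count k) rest.toFinset
      = Finset.filter (fun k => 2 ≤ rest.count k) rest.toFinset := by
    apply Finset.filter_congr
    intro k hk
    have hkx : x ≠ k := by intro h; subst h; exact hx (List.mem_toFinset.1 hk)
    simp [List.count_append, List.count_replicate, hkx]
  rw [htf, Finset.filter_insert, if_pos (by omega), hfeq,
    Finset.card_insert_of_notMem (by simp [List.mem_toFinset, hx])]
  omega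

-- x does not survive dropWhile (== x) in a sorted list bounded below by x.
lemma pv_not_mem_dropWhile : ∀ (r : List Int) (x : Int), r.Pairwise (· ≤ ·) →
    (∀ z ∈ r, x ≤ z) → x ∉ r.dropWhile (fun z => z == x) := by
  intro r x
  induction r with
  | nil => intro _ _ h; simp at h
  | cons y r ih =>
    intro hp hb
    by_cases hyx : y = x
    · rw [List.dropWhile_cons_of_pos (by simp [hyx])]
      exact ih (List.Pairwise.of_cons hp) (fun z hz => hb z (List.mem_cons_of_mem _ hz))
    · rw [List.dropWhile_cons_of_neg (by simp [hyx])]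
      intro hmem
      rcases List.mem_cons.1 hmem with h | h
      · exact hyx h.symm
      · have h1 : x ≤ y := hb y (List.mem_cons_self)
        have h2 : y ≤ x := List.rel_of_pairwise_cons hp h
        exact hyx (le_antisymm h2 h1)

-- sorted x::x::r splits as a run of x of length ≥ 2 followed by a tail without x
lemma pv_decomp (x : Int) (r : List Int) :
    x :: x :: r = List.replicate (2 + (r.takeWhile (fun z => z == x)).length) x
        ++ r.dropWhile (fun z => z == x) := by
  have ht : r.takeWhile (fun z => z == x)
      = List.replicate (r.takeWhile (fun z => z == x)).length x := by
    apply List.eq_replicate_of_mem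
    intro b hb
    have := List.mem_takeWhile_imp hb
    simpa using this
  calc x :: x :: r = List.replicate 2 x ++ (r.takeWhile (fun z => z == x)
          ++ r.dropWhile (fun z => z == x)) := by
        rw [List.takeWhile_append_dropWhile]; rfl
    _ = _ := by rw [ht, ← List.append_assoc, ← List.replicate_add]; simp

-- B's fold over zip(nodes, nodes[1:]) as a structural recursion over nodes
def pvF : (Int × Bool) → List Int → Int × Bool
  | st, [] => st
  | st, [_] => st
  | st, x :: y :: r => pvF (pvStep st (x, y)) (y :: r)

lemma pv_zip_fold : ∀ (s : List Int) (st : Int × Bool),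
    (s.zip s.tail).foldl pvStep st = pvF st s := by
  intro s
  induction s with
  | nil => intro st; rfl
  | cons x s ih =>
    intro st
    cases s with
    | nil => rfl
    | cons y r =>
      show ((x, y) :: (y :: r).zip r).foldl pvStep st = _
      have : (y :: r).zip r = ((y :: r).zip ((y :: r).tail)) := rfl
      rw [List.foldl_cons, this, ih]
      rfl

-- the joint run-scan induction: P (flag false) and Q (flag true, head already counted)
lemma pv_main : ∀ (n : ℕ),
    (∀ s : List Int, s.length ≤ n → s.Pairwise (· ≤ ·) → ∀ t : Int,
      (pvF (t, false) s).1 = t + (pvM s : Int))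
    ∧ (∀ (x : Int) (s : List Int), s.length + 1 ≤ n → (x :: s).Pairwise (· ≤ ·) → ∀ t : Int,
      (pvF (t, true) (x :: s)).1 = t + (pvM (s.dropWhile (fun z => z == x)) : Int)) := by
  intro n
  induction n with
  | zero =>
    constructor
    · intro s hs _ t
      have hnil : s = [] := List.length_eq_zero_iff.1 (by omega)
      subst hnil
      simp [pvF, pvM_nil]
    · intro x s hs
      omega
  | succ n ih =>
    obtain ⟨ihP, ihQ⟩ := ih
    constructor
    · -- P
      intro s hlen hsort t
      match s with
      | [] => simp [pvF, pvM_nil]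
      | [x] =>
        have : pvM [x] = 0 := by simp [pvM]
        simp [pvF, this]
      | x :: y :: r =>
        by_cases hxy : x = y
        · subst hxy
          have hstep : pvStep (t, false) (x, x) = (t + 1, true) := by simp [pvStep]
          have hq := ihQ x r (by simp at hlen ⊢; omega)
            (List.Pairwise.of_cons hsort) (t + 1)
          have hxr : x ∉ r.dropWhile (fun z => z == x) := by
            apply pv_not_mem_dropWhile r x
              (List.Pairwise.of_cons (List.Pairwise.of_cons hsort))
            intro z hz
            exact List.rel_of_pairwise_cons hsort (List.mem_cons_of_mem _ hz)
          have hM : pvM (x :: x :: r)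
              = 1 + pvM (r.dropWhile (fun z => z == x)) := by
            rw [pv_decomp x r]
            exact pvM_run _ hxr (by omega)
          show (pvF (pvStep (t, false) (x, x)) (x :: r)).1 = _
          rw [hstep, hq, hM]
          push_cast
          ring
        · have hstep : pvStep (t, false) (x, y) = (t, false) := by
            simp [pvStep, hxy]
          have hp := ihP (y :: r) (by simp at hlen ⊢; omega)
            (List.Pairwise.of_cons hsort) t
          have hxmem : x ∉ y :: r := by
            intro hmem
            rcases List.mem_cons.1 hmem with h | h
            · exact hxy h
            · have h1 : x ≤ y := List.rel_of_pairwise_cons hsort List.mem_cons_self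
              have h2 : y ≤ x :=
                List.rel_of_pairwise_cons (List.Pairwise.of_cons hsort) h
              exact hxy (le_antisymm h1 h2)
          show (pvF (pvStep (t, false) (x, y)) (y :: r)).1 = _
          rw [hstep, hp, pvM_single hxmem]
    · -- Q
      intro x s hlen hsort t
      match s with
      | [] => simp [pvF, pvM_nil]
      | y :: r =>
        by_cases hxy : x = y
        · subst hxy
          have hstep : pvStep (t, true) (x, x) = (t, true) := by simp [pvStep]
          have hq := ihQ x r (by simp at hlen ⊢; omega)
            (List.Pairwise.of_cons hsort) t
          show (pvF (pvStep (t, true) (x, x)) (x :: r)).1 = _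
          rw [hstep, hq, List.dropWhile_cons_of_pos (by simp)]
        · have hstep : pvStep (t, true) (x, y) = (t, false) := by
            simp [pvStep, hxy]
          have hp := ihP (y :: r) (by simp at hlen ⊢; omega)
            (List.Pairwise.of_cons hsort) t
          show (pvF (pvStep (t, true) (x, y)) (y :: r)).1 = _
          rw [hstep, hp, List.dropWhile_cons_of_neg (by simp; exact fun h => hxy h.symm)]

-- ===== A-side: the counting dict records exact multiplicities =====
def pvInvA (p : List Int) (d : PySem.Dict Int Int) : Prop :=
  d.keys.Nodup ∧ (∀ k, d.contains k = true ↔ k ∈ p) ∧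
  (∀ k, d.getD k 0 = (p.count k : Int))

lemma pvInvA_init : pvInvA [] PySem.Dict.empty := by
  refine ⟨by simp, fun k => by simp [PySem.Dict.contains_empty], fun k => by
    simp [PySem.Dict.getD_empty]⟩

lemma pvInvA_step {p : List Int} {d : PySem.Dict Int Int} (node : Int)
    (h : pvInvA p d) : pvInvA (p ++ [node]) (pvA d node) := by
  obtain ⟨hnd, hmem, hcnt⟩ := h
  by_cases hin : node ∈ p
  · have h1 : d.getD node 0 ≠ 0 := by
      rw [hcnt]
      have := List.count_pos_iff.2 hin
      simp; omega
    have hA : pvA d node = PySem.Dict.insert d node (PySem.Dict.getD d node 0 + 1) := by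
      unfold pvA
      rw [if_pos (by rw [← PySem.Dict.getD_eq_get?_getD]; exact h1)]
    rw [hA]
    refine ⟨PySem.Dict.nodup_keys_insert _ _ _ hnd, ?_, ?_⟩
    · intro k
      by_cases hk : k = node
      · subst hk; simp [PySem.Dict.contains_insert, hin]
      · simp [PySem.Dict.contains_insert, hk, hmem k]
    · intro k
      by_cases hk : k = node
      · subst hk
        simp [PySem.Dict.getD_insert, List.count_append, hcnt]
      · have hk' : node ≠ k := fun h => hk h.symm
        simp [PySem.Dict.getD_insert, hk', hcnt k, List.count_append,
          List.count_singleton, hk]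
  · have h0 : d.getD node 0 = 0 := by
      rw [hcnt, List.count_eq_zero_of_not_mem hin]; rfl
    have hA : pvA d node = PySem.Dict.insert d node 1 := by
      unfold pvA
      rw [if_neg (by rw [← PySem.Dict.getD_eq_get?_getD, h0]; simp)]
    rw [hA]
    refine ⟨PySem.Dict.nodup_keys_insert _ _ _ hnd, ?_, ?_⟩
    · intro k
      by_cases hk : k = node
      · subst hk; simp [PySem.Dict.contains_insert]
      · simp [PySem.Dict.contains_insert, hk, hmem k]
    · intro k
      by_cases hk : k = node
      · subst hk
        simp [PySem.Dict.getD_insert, List.count_append,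
          List.count_eq_zero_of_not_mem hin]
      · have hk' : node ≠ k := fun h => hk h.symm
        simp [PySem.Dict.getD_insert, hk', hcnt k, List.count_append,
          List.count_singleton, hk]

lemma pvInvA_fold : ∀ (l p : List Int) (d : PySem.Dict Int Int),
    pvInvA p d → pvInvA (p ++ l) (l.foldl pvA d) := by
  intro l
  induction l with
  | nil => intro p d h; simpa using h
  | cons x l ih =>
    intro p d h
    have := ih (p ++ [x]) (pvA d x) (pvInvA_step x h)
    simpa using this

-- A's second loop over items counts exactly pvM of the processed list
lemma pv_countA {l : List Int} {d : PySem.Dict Int Int} (h : pvInvA l d) :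
    d.items.foldl (fun acc p => if p.2 > 1 then acc + 1 else acc) (0 : Int)
      = (pvM l : Int) := by
  obtain ⟨hnd, hmem, hcnt⟩ := h
  have hfold : d.items.foldl (fun acc p => if p.2 > 1 then acc + 1 else acc) (0 : Int)
      = ((d.items.countP (fun p => decide (p.2 > 1)) : ℕ) : Int) := by
    simpa using PySem.List.foldl_count_if (fun (p : Int × Int) => decide (p.2 > 1)) d.items 0
  rw [hfold]
  congr 1
  -- each recorded value is the count in l
  have hval : ∀ q ∈ d.items, q.2 = (l.count q.1 : Int) := by
    intro q hq
    have := PySem.Dict.getD_of_mem_items (d := d) (d0 := 0) (by exact hq) hnd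
    rw [← this, hcnt]
  have h1 : d.items.countP (fun p => decide (p.2 > 1))
      = d.items.countP (fun p => decide (2 ≤ l.count p.1)) := by
    apply List.countP_congr
    intro q hq
    rw [hval q hq]
    constructor <;> intro h <;> simp at h ⊢ <;> omega
  have h2 : d.items.countP (fun p => decide (2 ≤ l.count p.1))
      = (d.items.map Prod.fst).countP (fun k => decide (2 ≤ l.count k)) := by
    rw [List.countP_map]; rfl
  rw [h1, h2]
  -- keys are a nodup enumeration of l.toFinset
  have hkeys : d.items.map Prod.fst = PySem.Dict.keys d := rfl
  have hkmem : ∀ k, k ∈ PySem.Dict.keys d ↔ k ∈ l := by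
    intro k
    rw [← hmem k, PySem.Dict.contains_eq_decide_mem_keys]
    simp
  rw [hkeys, List.countP_eq_length_filter]
  have hfnd : (List.filter (fun k => decide (2 ≤ l.count k)) (PySem.Dict.keys d)).Nodup :=
    List.Nodup.filter _ hnd
  rw [← List.toFinset_card_of_nodup hfnd]
  unfold pvM
  congr 1
  apply Finset.ext
  intro k
  simp [hkmem k]

-- ===== VERDICT (by name: the statement is the Claim_ definition above) =====
theorem calculate_overlapping_nodes_spec : Claim_equal_calculate_overlapping_nodes := by
  intro clusters _
  unfold Spec_calculate_overlapping_nodes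
  show calculate_overlapping_nodes clusters = calculate_overlapping_nodes_alt clusters
  have hinv : pvInvA clusters.flatten (clusters.flatten.foldl pvA PySem.Dict.empty) := by
    have := pvInvA_fold clusters.flatten [] PySem.Dict.empty pvInvA_init
    simpa using this
  have hA : calculate_overlapping_nodes clusters = (pvM clusters.flatten : Int) := by
    simp only [calculate_overlapping_nodes]
    rw [← List.foldl_flatten]
    exact pv_countA hinv
  have hsort : (PySem.List.sorted clusters.flatten (fun x => x) false).Pairwise (· ≤ ·) := by
    have := PySem.List.sorted_pairwise (xs := clusters.flatten) (key := fun x => x)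
    simpa using this
  have hperm : (PySem.List.sorted clusters.flatten (fun x => x) false).Perm clusters.flatten :=
    PySem.List.sorted_perm _ _ _
  have hB : calculate_overlapping_nodes_alt clusters = (pvM clusters.flatten : Int) := by
    simp only [calculate_overlapping_nodes_alt, PySem.List.slice_from_one, pv_zip_fold]
    have := (pv_main (PySem.List.sorted clusters.flatten (fun x => x) false).length).1
      (PySem.List.sorted clusters.flatten (fun x => x) false) le_rfl hsort 0
    rw [this, pvM_perm hperm]
    ring
  rw [hA, hB]
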